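-- pv_equiv track=rewrite | github.com/aniketW42/BluePineapple | Python Programs/140.py | extract_non_duplicate_elements
-- ===== SOURCE A (Python) =====
-- from collections import Counter
--
-- def extract_non_duplicate_elements(tuple_list: list[tuple]) -> list:
--
--     occurences = Counter()
--
--     for tup in tuple_list:
--         freq = Counter(tup)
--         occurences = occurences + freq
--
--     non_duplicate = []
--
--     for key, val in occurences.items():
--         if val == 1:
--             non_duplicate.append(key)
--
--     return non_duplicate
-- ===== SOURCE B (Python) =====
-- def extract_non_duplicate_elements(tuple_list: list[tuple]) -> list:
--     # one pass with on-the-fly singleton tracking instead of count-then-filter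
--     seen = set()
--     multiple = set()
--     once = []
--     for tup in tuple_list:
--         for x in tup:
--             if x in multiple:
--                 continue
--             if x in seen:
--                 once.remove(x)
--                 multiple.add(x)
--             else:
--                 seen.add(x)
--                 once.append(x)
--     return once
-- ===== Notes on version B (the rewrite author's own statement) =====
-- stated objective: faster
-- what changed: Replaces the Counter-per-tuple plus quadratic Counter addition and the final count==1 filter pass with a single pass over all elements that tracks singletons on the fly via seen/multiple sets and an order-preserving once list.
import Mathlib
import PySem

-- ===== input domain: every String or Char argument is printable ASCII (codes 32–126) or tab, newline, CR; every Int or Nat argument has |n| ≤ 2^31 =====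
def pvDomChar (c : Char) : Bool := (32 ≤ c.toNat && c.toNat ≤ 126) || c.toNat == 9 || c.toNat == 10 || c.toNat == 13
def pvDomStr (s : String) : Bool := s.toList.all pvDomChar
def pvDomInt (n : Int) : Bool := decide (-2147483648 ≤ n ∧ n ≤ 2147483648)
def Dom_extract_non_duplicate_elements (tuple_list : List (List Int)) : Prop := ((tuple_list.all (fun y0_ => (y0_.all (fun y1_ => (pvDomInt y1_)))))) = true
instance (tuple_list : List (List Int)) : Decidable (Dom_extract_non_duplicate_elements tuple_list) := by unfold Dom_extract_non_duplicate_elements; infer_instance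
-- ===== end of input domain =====

-- B replaces A's Counter-per-tuple merging and final count==1 filter pass with a single pass over all
-- elements tracking singletons via seen/multiple sets and an order-preserving once list.


-- ===== PORT A =====
-- Counter.__add__ : iterate self's items keeping positive sums, then other's items on fresh keys
def pvCounterAdd (a b : PySem.Dict Int Int) : PySem.Dict Int Int :=
  let r := a.items.foldl (fun r kv =>
      let n := kv.2 + b.getD kv.1 0
      if 0 < n then r.insert kv.1 n else r) PySem.Dict.empty
  b.items.foldl (fun r kv =>
      if a.contains kv.1 = false ∧ 0 < kv.2 then r.insert kv.1 kv.2 else r) r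

def extract_non_duplicate_elements (tuple_list : List (List Int)) : List Int :=
  let occurences := tuple_list.foldl
    (fun occurences tup => pvCounterAdd occurences (PySem.Dict.counter tup)) PySem.Dict.empty
  occurences.items.foldl (fun acc kv => if kv.2 = 1 then acc ++ [kv.1] else acc) []

-- ===== PORT B =====
-- state (seen, multiple, once); once.remove(x) only fires with x ∈ once, .getD is the totality guard
def pvStepB (st : PySem.Set Int × PySem.Set Int × List Int) (x : Int) :
    PySem.Set Int × PySem.Set Int × List Int :=
  if PySem.Set.contains st.2.1 x then st
  else if PySem.Set.contains st.1 x then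
    (st.1, PySem.Set.add st.2.1 x, (PySem.List.remove? st.2.2 x).getD st.2.2)
  else (PySem.Set.add st.1 x, st.2.1, st.2.2 ++ [x])

def extract_non_duplicate_elements_alt (tuple_list : List (List Int)) : List Int :=
  (tuple_list.foldl (fun st tup => tup.foldl pvStepB st)
    (PySem.Set.empty, PySem.Set.empty, ([] : List Int))).2.2

-- ===== PRECONDITION & SPEC =====
def Spec_extract_non_duplicate_elements (tuple_list : List (List Int)) (out : List Int) : Prop := out = extract_non_duplicate_elements_alt tuple_list
instance (tuple_list : List (List Int)) (out : List Int) : Decidable (Spec_extract_non_duplicate_elements tuple_list out) := by unfold Spec_extract_non_duplicate_elements; infer_instance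

-- ===== CLAIM (what is proved, stated in full; the proofs are below) =====
def Claim_equal_extract_non_duplicate_elements : Prop := ∀ (tuple_list : List (List Int)), Dom_extract_non_duplicate_elements tuple_list → Spec_extract_non_duplicate_elements tuple_list (extract_non_duplicate_elements tuple_list)

-- ===== LEMMAS AND PROOFS =====

-- the common normal form: first-occurrence keys of p whose total count in p is 1
def pvOnce (p : List Int) : List Int :=
  (PySem.Set.ofList p).filter (fun k => List.count k p == 1)

theorem pv_foldl_ite_filter (c : Int → Bool) (f : PySem.Dict Int Int → Int → PySem.Dict Int Int)
    (s : List Int) (d : PySem.Dict Int Int) :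
    s.foldl (fun r k => if c k then f r k else r) d = (s.filter c).foldl f d := by
  induction s generalizing d with
  | nil => rfl
  | cons x t ih => by_cases h : c x <;> simp [h, ih]

-- Counter.__add__ of two list counters is the counter of the concatenation
theorem pvCounterAdd_counter (l t : List Int) :
    pvCounterAdd (PySem.Dict.counter l) (PySem.Dict.counter t)
      = PySem.Dict.counter (l ++ t) := by
  unfold pvCounterAdd
  rw [PySem.Dict.items_counter l, PySem.Dict.items_counter t]
  have h1 : ((PySem.Set.ofList l).map (fun k => (k, (l.count k : Int)))).foldl
      (fun r kv => let n := kv.2 + (PySem.Dict.counter t).getD kv.1 0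
        if 0 < n then r.insert kv.1 n else r) PySem.Dict.empty
      = ((PySem.Set.ofList l).map (fun k => (k, (l.count k : Int)))).foldl
      (fun r kv => r.insert kv.1 (kv.2 + (PySem.Dict.counter t).getD kv.1 0)) PySem.Dict.empty := by
    apply PySem.List.foldl_congr_mem
    intro acc kv hkv
    simp only [List.mem_map] at hkv
    obtain ⟨k, hk, rfl⟩ := hkv
    have hkl : k ∈ l := (PySem.Set.mem_ofList l k).1 hk
    have hc : 1 ≤ l.count k := List.one_le_count_iff.2 hkl
    have ht : (0:Int) ≤ (PySem.Dict.counter t).getD k 0 := by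
      rw [PySem.Dict.getD_counter]; positivity
    have hpos : (0:Int) < (l.count k : Int) + (PySem.Dict.counter t).getD k 0 := by
      have : (1:Int) ≤ (l.count k : Int) := by exact_mod_cast hc
      omega
    simp only []
    rw [if_pos hpos]
  have hr : ((PySem.Set.ofList l).map (fun k => (k, (l.count k : Int)))).foldl
      (fun r kv => r.insert kv.1 (kv.2 + (PySem.Dict.counter t).getD kv.1 0)) PySem.Dict.empty
      = PySem.Dict.mk ((PySem.Set.ofList l).map (fun a => (a, (l.count a : Int) + (t.count a : Int)))) := by
    rw [List.foldl_map]
    apply PySem.Dict.ext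
    rw [PySem.Dict.items_foldl_insert_fresh (PySem.Set.ofList l) (fun a => a)
        (fun a => ((l.count a : Int) + (PySem.Dict.counter t).getD a 0)) PySem.Dict.empty
        (fun a _ => PySem.Dict.contains_empty a)
        (by simpa using PySem.Set.nodup_ofList l)]
    simp [PySem.Dict.getD_counter]
    rfl
  rw [h1, hr]
  -- second loop: the condition is determined by key membership in l
  have h2 : ((PySem.Set.ofList t).map (fun k => (k, (t.count k : Int)))).foldl
      (fun r kv => if (PySem.Dict.counter l).contains kv.1 = false ∧ 0 < kv.2
        then r.insert kv.1 kv.2 else r)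
        (PySem.Dict.mk ((PySem.Set.ofList l).map (fun a => (a, (l.count a : Int) + (t.count a : Int)))))
      = (PySem.Set.ofList t).foldl
      (fun r k => if !(l.contains k) then r.insert k (t.count k : Int) else r)
        (PySem.Dict.mk ((PySem.Set.ofList l).map (fun a => (a, (l.count a : Int) + (t.count a : Int))))) := by
    rw [List.foldl_map]
    apply PySem.List.foldl_congr_mem
    intro acc k hk
    have hkt : k ∈ t := (PySem.Set.mem_ofList t k).1 hk
    have hc : 0 < (t.count k : Int) := by
      have := List.one_le_count_iff.2 hkt; exact_mod_cast this
    rw [PySem.Dict.contains_counter]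
    by_cases hl : k ∈ l
    · simp [hl]
    · simp [hl, hkt]
  rw [h2, pv_foldl_ite_filter]
  apply PySem.Dict.ext
  rw [PySem.Dict.items_foldl_insert_fresh _ (fun a => a) (fun a => (t.count a : Int)) _
      ?fresh ?nd]
  case fresh =>
    intro a ha
    simp only [List.mem_filter] at ha
    simp only [PySem.Dict.contains_mk]
    have h2 : a ∉ l := by
      have := ha.2; simp at this; exact this
    simp
    intro x hx hax
    exact h2 (hax ▸ hx)
  case nd =>
    simpa using (PySem.Set.nodup_ofList t).filter _
  · rw [PySem.Dict.items_counter (l ++ t), PySem.Set.ofList_append,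
      PySem.Set.update_eq_append_filter, List.map_append]
    show _ ++ _ = _
    congr 1
    · apply List.map_congr_left
      intro a ha
      have hal : a ∈ l := (PySem.Set.mem_ofList l a).1 ha
      simp [List.count_append]
    · have hfil : List.filter (fun y => !(PySem.Set.ofList l).contains y) (PySem.Set.ofList t)
          = List.filter (fun y => !l.contains y) (PySem.Set.ofList t) := by
        apply List.filter_congr
        intro x _
        simp [PySem.Set.contains_eq_listContains]
      rw [hfil]
      apply List.map_congr_left
      intro a ha
      simp only [List.mem_filter, Bool.not_eq_eq_eq_not, Bool.not_true] at ha
      have : a ∉ l := by simpa using ha.2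
      have hz : l.count a = 0 := List.count_eq_zero.2 this
      simp [List.count_append, hz]

theorem pvA_fold (ts : List (List Int)) : ∀ l : List Int,
    ts.foldl (fun occ tup => pvCounterAdd occ (PySem.Dict.counter tup)) (PySem.Dict.counter l)
      = PySem.Dict.counter (l ++ ts.flatten) := by
  induction ts with
  | nil => intro l; simp
  | cons tup rest ih =>
      intro l
      simp only [List.foldl_cons, pvCounterAdd_counter, ih, List.flatten_cons, List.append_assoc]

-- A computes the once-only first-occurrence keys of the flattened input
theorem pvA_char (tuple_list : List (List Int)) :
    extract_non_duplicate_elements tuple_list = pvOnce tuple_list.flatten := by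
  unfold extract_non_duplicate_elements
  have h0 : (PySem.Dict.empty : PySem.Dict Int Int) = PySem.Dict.counter [] := rfl
  rw [h0, pvA_fold tuple_list [], List.nil_append]
  show ((PySem.Dict.counter tuple_list.flatten).items).foldl
      (fun acc kv => if kv.2 = 1 then acc ++ [kv.1] else acc) [] = pvOnce tuple_list.flatten
  rw [PySem.Dict.items_counter, List.foldl_map]
  have hcong : ∀ (acc : List Int), ∀ k ∈ PySem.Set.ofList tuple_list.flatten,
      (fun (acc : List Int) (k : Int) =>
        if ((k, (tuple_list.flatten.count k : Int)).2 = 1 : Prop)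
        then acc ++ [(k, (tuple_list.flatten.count k : Int)).1] else acc) acc k
      = (fun (acc : List Int) (k : Int) =>
        if (tuple_list.flatten.count k == 1) = true then acc ++ [id k] else acc) acc k := by
    intro acc k _
    by_cases h : tuple_list.flatten.count k = 1
    · simp [h]
    · have : ¬ ((tuple_list.flatten.count k : Int) = 1) := by exact_mod_cast h
      simp [h, this]
  rw [PySem.List.foldl_congr_mem _ _ _ _ hcong,
    PySem.List.foldl_append_if (fun k => tuple_list.flatten.count k == 1) id]
  simp [pvOnce]

-- B-side facts about pvOnce under appending one element
theorem pv_remove?_of_mem {l : List Int} {x : Int} (hx : x ∈ l) :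
    PySem.List.remove? l x = some (l.erase x) := by
  obtain ⟨i, hi⟩ := Option.isSome_iff_exists.1 (List.isSome_idxOf?.2 hx)
  simp only [PySem.List.remove?, hi, Option.map_some]
  rw [List.erase_eq_eraseIdx, hi]

theorem pv_count_app (p : List Int) (x k : Int) :
    List.count k (p ++ [x]) = List.count k p + (if k = x then 1 else 0) := by
  simp [List.count_append, List.count_singleton, beq_iff_eq]
  by_cases h : k = x
  · subst h; simp
  · have h2 : ¬ x = k := fun he => h he.symm
    simp [h, h2]

theorem pvOnce_app_dup (p : List Int) (x : Int) (hc : 2 ≤ List.count x p) :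
    pvOnce (p ++ [x]) = pvOnce p := by
  unfold pvOnce
  rw [PySem.Set.ofList_append_singleton,
    PySem.Set.add_of_mem ((PySem.Set.mem_ofList p x).2 (List.one_le_count_iff.1 (by omega)))]
  apply List.filter_congr
  intro k _
  rw [pv_count_app]
  by_cases hk : k = x
  · subst hk; simp; omega
  · simp [hk]

theorem pvOnce_app_one (p : List Int) (x : Int) (hc : List.count x p = 1) :
    pvOnce (p ++ [x]) = (PySem.List.remove? (pvOnce p) x).getD (pvOnce p) := by
  have hxp : x ∈ p := List.one_le_count_iff.1 (by omega)
  have hxo : x ∈ pvOnce p := by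
    unfold pvOnce
    rw [List.mem_filter]
    exact ⟨(PySem.Set.mem_ofList p x).2 hxp, by simp [hc]⟩
  rw [pv_remove?_of_mem hxo, Option.getD_some]
  unfold pvOnce
  rw [((PySem.Set.nodup_ofList p).filter _).erase_eq_filter x]
  rw [PySem.Set.ofList_append_singleton,
    PySem.Set.add_of_mem ((PySem.Set.mem_ofList p x).2 hxp), List.filter_filter]
  apply List.filter_congr
  intro k _
  rw [pv_count_app]
  by_cases hk : k = x
  · subst hk; simp [hc]
  · simp [hk]

theorem pvOnce_app_new (p : List Int) (x : Int) (hc : List.count x p = 0) :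
    pvOnce (p ++ [x]) = pvOnce p ++ [x] := by
  have hxp : x ∉ p := by
    intro hx; have := List.one_le_count_iff.2 hx; omega
  unfold pvOnce
  rw [PySem.Set.ofList_append_singleton,
    PySem.Set.add_of_not_mem (fun hx => hxp ((PySem.Set.mem_ofList p x).1 hx)),
    List.filter_append]
  congr 1
  · apply List.filter_congr
    intro k hk
    rw [pv_count_app]
    have : k ≠ x := fun he => hxp (he ▸ (PySem.Set.mem_ofList p k).1 hk)
    simp [this]
  · simp [pv_count_app, hc]

-- one step of B preserves the invariant
theorem pvStepB_key (p mult : List Int) (x : Int)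
    (h : ∀ y : Int, y ∈ mult ↔ 2 ≤ List.count y p) :
    pvStepB (PySem.Set.ofList p, mult, pvOnce p) x
      = (PySem.Set.ofList (p ++ [x]),
         (if 1 ≤ List.count x p then PySem.Set.add mult x else mult),
         pvOnce (p ++ [x])) := by
  unfold pvStepB
  rcases Nat.lt_or_ge (List.count x p) 1 with hc | hc
  · have hc0 : List.count x p = 0 := by omega
    have hxp : x ∉ p := fun hx => by have := List.one_le_count_iff.2 hx; omega
    have hxm : x ∉ mult := fun hx => by have := (h x).1 hx; omega
    have c1 : PySem.Set.contains mult x = false := by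
      simp [PySem.Set.contains_eq_listContains, hxm]
    have c2 : PySem.Set.contains (PySem.Set.ofList p) x = false := by
      simp [PySem.Set.contains_eq_listContains, PySem.Set.mem_ofList, hxp]
    simp only [c1, c2, Bool.false_eq_true, if_false]
    rw [pvOnce_app_new p x hc0, PySem.Set.ofList_append_singleton,
      PySem.Set.add_of_not_mem (fun hx => hxp ((PySem.Set.mem_ofList p x).1 hx))]
    simp [hc0]
  · rcases Nat.lt_or_ge (List.count x p) 2 with hc2 | hc2
    · have hc1 : List.count x p = 1 := by omega
      have hxp : x ∈ p := List.one_le_count_iff.1 hc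
      have hxm : x ∉ mult := fun hx => by have := (h x).1 hx; omega
      have c1 : PySem.Set.contains mult x = false := by
        simp [PySem.Set.contains_eq_listContains, hxm]
      have c2 : PySem.Set.contains (PySem.Set.ofList p) x = true := by
        simp [PySem.Set.contains_eq_listContains, PySem.Set.mem_ofList, hxp]
      simp only [c1, c2, Bool.false_eq_true, if_false, if_true]
      rw [pvOnce_app_one p x hc1, PySem.Set.ofList_append_singleton,
        PySem.Set.add_of_mem ((PySem.Set.mem_ofList p x).2 hxp)]
      simp [hc]
    · have hxm : x ∈ mult := (h x).2 hc2
      have c1 : PySem.Set.contains mult x = true := by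
        simp [PySem.Set.contains_eq_listContains, hxm]
      simp only [c1, if_true]
      rw [pvOnce_app_dup p x hc2, PySem.Set.ofList_append_singleton,
        PySem.Set.add_of_mem ((PySem.Set.mem_ofList p x).2 (List.one_le_count_iff.1 hc)),
        if_pos hc, PySem.Set.add_of_mem hxm]

-- loop invariant of B over a flat run of elements
theorem pvB_inv (l : List Int) : ∀ (p mult : List Int),
    (∀ x : Int, x ∈ mult ↔ 2 ≤ List.count x p) →
    ∃ mult' : List Int, (∀ x : Int, x ∈ mult' ↔ 2 ≤ List.count x (p ++ l)) ∧
    l.foldl pvStepB (PySem.Set.ofList p, mult, pvOnce p)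
      = (PySem.Set.ofList (p ++ l), mult', pvOnce (p ++ l)) := by
  induction l with
  | nil => intro p mult h; exact ⟨mult, by simpa using h, by simp⟩
  | cons x t ih =>
    intro p mult h
    have key := pvStepB_key p mult x h
    have hinv2 : ∀ y : Int, y ∈ (if 1 ≤ List.count x p then PySem.Set.add mult x else mult)
        ↔ 2 ≤ List.count y (p ++ [x]) := by
      intro y
      by_cases hy : y = x
      · subst hy
        by_cases hc : 1 ≤ List.count y p
        · have hm : y ∈ PySem.Set.add mult y := (PySem.Set.mem_add mult y y).2 (Or.inr rfl)
          simp only [hc, if_true]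
          simp [hm, List.count_append]
          exact List.one_le_count_iff.1 hc
        · have h0 : List.count y p = 0 := by omega
          simp only [hc, if_false]
          rw [h]
          simp [List.count_append, h0]
      · have hcnt : List.count y (p ++ [x]) = List.count y p := by
          have : x ≠ y := fun hxy => hy hxy.symm
          simp [List.count_append, List.count_singleton, this]
        rw [hcnt]
        by_cases hc : 1 ≤ List.count x p <;>
          simp [hc, PySem.Set.mem_add, hy, h y]
    obtain ⟨mult', hm, hfold⟩ := ih (p ++ [x]) _ hinv2
    rw [List.append_cons p x t]
    exact ⟨mult', hm, by simp only [List.foldl_cons, key, hfold]⟩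

-- B computes the once-only first-occurrence keys of the flattened input
theorem pvB_char (tuple_list : List (List Int)) :
    extract_non_duplicate_elements_alt tuple_list = pvOnce tuple_list.flatten := by
  unfold extract_non_duplicate_elements_alt
  rw [← List.foldl_flatten]
  obtain ⟨mult', _, hfold⟩ := pvB_inv tuple_list.flatten [] []
    (fun x => by simp)
  have h0 : (PySem.Set.empty, PySem.Set.empty, ([] : List Int))
      = (PySem.Set.ofList ([] : List Int), ([] : List Int), pvOnce []) := rfl
  rw [h0, hfold]
  simp

-- ===== VERDICT (by name: the statement is the Claim_ definition above) =====
theorem extract_non_duplicate_elements_spec : Claim_equal_extract_non_duplicate_elements := by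
  intro tuple_list _
  unfold Spec_extract_non_duplicate_elements
  rw [pvA_char, pvB_char]
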